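-- pv_equiv track=rewrite | github.com/Karo555/multiple_sequence_alignment | utils/functions.py | merge_alignments_to_msa
-- ===== SOURCE A (Python) =====
-- from typing import List
--
-- def merge_alignments_to_msa(aligned_seqs: List[str], center_index: int) -> List[str]:
--     """
--     Ensures all sequences align with the final gapped center sequence.
--     Inserts gaps as needed so that all sequences share the same gap structure.
--     """
--     final_center = aligned_seqs[center_index]
--     msa = [''] * len(aligned_seqs)
--
--     for pos in range(len(final_center)):
--         if final_center[pos] == '-':
--             # Insert a gap at this position in all sequences
--             for i in range(len(aligned_seqs)):
--                 if len(aligned_seqs[i]) <= pos or aligned_seqs[i][pos] != '-':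
--                     msa[i] += '-'
--                 else:
--                     msa[i] += aligned_seqs[i][pos]
--         else:
--             # Add the actual character from each sequence
--             for i in range(len(aligned_seqs)):
--                 msa[i] += aligned_seqs[i][pos]
--
--     return msa
-- ===== SOURCE B (Python) =====
-- from typing import List
--
-- def merge_alignments_to_msa(aligned_seqs: List[str], center_index: int) -> List[str]:
--     """Row-at-a-time rebuild: each output string is produced in one pass over the
--     gapped center, emitting '-' wherever the center has a gap and the sequence's
--     own character elsewhere."""
--     final_center = aligned_seqs[center_index]
--     return [
--         ''.join('-' if c == '-' else seq[pos] for pos, c in enumerate(final_center))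
--         for seq in aligned_seqs
--     ]
-- ===== Notes on version B (the rewrite author's own statement) =====
-- stated objective: simpler
-- what changed: Transposed the loop nest: instead of growing all rows column-by-column across a fold over center positions, B builds each output row in one pass (one join per sequence, emitting '-' at center gaps and the sequence's own character elsewhere), using the fact that the gap branch always emits '-'.
import Mathlib
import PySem

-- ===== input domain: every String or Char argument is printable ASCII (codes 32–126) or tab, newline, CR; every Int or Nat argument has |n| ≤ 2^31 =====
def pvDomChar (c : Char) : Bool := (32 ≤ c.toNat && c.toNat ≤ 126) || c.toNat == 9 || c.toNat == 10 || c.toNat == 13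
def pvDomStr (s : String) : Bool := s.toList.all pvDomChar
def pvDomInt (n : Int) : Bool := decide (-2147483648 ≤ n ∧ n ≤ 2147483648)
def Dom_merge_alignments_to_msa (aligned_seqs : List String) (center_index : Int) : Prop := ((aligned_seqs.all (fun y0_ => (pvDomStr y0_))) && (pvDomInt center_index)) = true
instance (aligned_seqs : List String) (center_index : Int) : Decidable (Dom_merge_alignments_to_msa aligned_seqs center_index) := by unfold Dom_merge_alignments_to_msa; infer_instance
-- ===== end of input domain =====

-- ===== PORT A =====
-- B changes: transposed loop nest — one row built per sequence in a single pass, instead of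
-- growing every row column-by-column (objective: simpler).

-- aligned_seqs[center_index], as a char list; exact under Pre_ (pyGet? = some there)
def pvCenter (aligned_seqs : List String) (center_index : Int) : List Char :=
  ((PySem.List.pyGet? aligned_seqs center_index).getD "").toList

-- one iteration of A's outer 'for pos in range(len(final_center))' loop; the inner
-- 'for i in range(len(aligned_seqs))' updating msa[i] from aligned_seqs[i] is the zip-map.
-- s[pos] is ported as .toList.getD pos ' ': exact wherever Python reads it under Pre_
-- (in the gap branch the read is short-circuit-guarded in range; in the other branch Pre_ gives range).
def pvStepA (aligned_seqs : List String) (final_center : List Char)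
    (msa : List String) (pos : Nat) : List String :=
  if final_center.getD pos ' ' = '-' then
    (aligned_seqs.zip msa).map (fun p =>
      if p.1.toList.length ≤ pos ∨ p.1.toList.getD pos ' ' ≠ '-' then p.2 ++ "-"
      else p.2 ++ String.ofList [p.1.toList.getD pos ' '])
  else
    (aligned_seqs.zip msa).map (fun p => p.2 ++ String.ofList [p.1.toList.getD pos ' '])

def merge_alignments_to_msa (aligned_seqs : List String) (center_index : Int) : List String :=
  let final_center := pvCenter aligned_seqs center_index
  (List.range final_center.length).foldl (pvStepA aligned_seqs final_center)
    (List.replicate aligned_seqs.length "")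

-- ===== PORT B =====
-- ''.join('-' if c == '-' else seq[pos] for pos, c in enumerate(final_center))
def pvRowB (final_center seq : List Char) : List Char :=
  (PySem.List.enumerate final_center).map
    (fun pc => if pc.2 = '-' then '-' else PySem.List.pyGetD seq pc.1 ' ')

def merge_alignments_to_msa_alt (aligned_seqs : List String) (center_index : Int) : List String :=
  let final_center := pvCenter aligned_seqs center_index
  aligned_seqs.map (fun seq => String.ofList (pvRowB final_center seq.toList))

-- ===== PRECONDITION & SPEC =====
-- Pre_ excludes exactly the inputs on which Python A raises IndexError: a center_index out of
-- range for aligned_seqs, or some sequence shorter than a non-gap position of the center.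
def Pre_merge_alignments_to_msa (aligned_seqs : List String) (center_index : Int) : Prop :=
  PySem.Raise.InRange aligned_seqs.length center_index ∧
  ∀ s ∈ aligned_seqs, ∀ pos ∈ List.range (pvCenter aligned_seqs center_index).length,
    (pvCenter aligned_seqs center_index).getD pos ' ' ≠ '-' → pos < s.toList.length

instance (aligned_seqs : List String) (center_index : Int) :
    Decidable (Pre_merge_alignments_to_msa aligned_seqs center_index) := by
  unfold Pre_merge_alignments_to_msa; infer_instance

def pvWitness_merge_alignments_to_msa : List String × Int := (["A-C", "AGC", "T-T"], 1)


def Spec_merge_alignments_to_msa (aligned_seqs : List String) (center_index : Int) (out : List String) : Prop := out = merge_alignments_to_msa_alt aligned_seqs center_index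
instance (aligned_seqs : List String) (center_index : Int) (out : List String) : Decidable (Spec_merge_alignments_to_msa aligned_seqs center_index out) := by unfold Spec_merge_alignments_to_msa; infer_instance

-- ===== CLAIM (what is proved, stated in full; the proofs are below) =====
def Claim_equal_merge_alignments_to_msa : Prop := ∀ (aligned_seqs : List String) (center_index : Int), Dom_merge_alignments_to_msa aligned_seqs center_index → Pre_merge_alignments_to_msa aligned_seqs center_index → Spec_merge_alignments_to_msa aligned_seqs center_index (merge_alignments_to_msa aligned_seqs center_index)

-- ===== LEMMAS AND PROOFS =====

-- the character both programs place at position pos of the row for sequence s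
def pvChar (final_center s : List Char) (pos : Nat) : Char :=
  if final_center.getD pos ' ' = '-' then '-' else s.getD pos ' '

lemma pvRowB_eq (fc s : List Char) :
    pvRowB fc s = (List.range fc.length).map (pvChar fc s) := by
  apply List.ext_getElem
  · simp [pvRowB, PySem.List.length_enumerate]
  · intro k h1 h2
    simp [pvRowB, PySem.List.length_enumerate, List.length_range] at h1 h2 ⊢
    simp [PySem.List.getElem_enumerate, pvChar, PySem.List.pyGetD_natCast]
    simp [List.getElem?_eq_getElem h2]

lemma pvZipMapMap {α β γ : Type} (l : List α) (f : α → β) (g : α × β → γ) :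
    (l.zip (l.map f)).map g = l.map (fun a => g (a, f a)) := by
  induction l with
  | nil => simp
  | cons x xs ih => simp [ih]

lemma pvFoldA (aligned_seqs : List String) (fc : List Char) (n : Nat) :
    (List.range n).foldl (pvStepA aligned_seqs fc) (List.replicate aligned_seqs.length "")
      = aligned_seqs.map (fun s => String.ofList ((List.range n).map (pvChar fc s.toList))) := by
  induction n with
  | zero =>
    simp only [List.range_zero, List.foldl_nil, List.map_nil]
    rw [eq_comm, List.eq_replicate_iff]
    simp
  | succ n ih =>
    rw [List.range_succ, List.foldl_append, List.foldl_cons, List.foldl_nil, ih]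
    unfold pvStepA
    split
    · rename_i hgap
      rw [pvZipMapMap]
      apply List.map_congr_left
      intro s _
      simp only [List.getD_eq_getElem?_getD] at hgap
      split
      · simp [pvChar, hgap]
      · rename_i hcond
        push Not at hcond
        simp only [List.getD_eq_getElem?_getD] at hcond
        simp [pvChar, hgap, hcond.2]
    · rename_i hgap
      rw [pvZipMapMap]
      apply List.map_congr_left
      intro s _
      simp only [List.getD_eq_getElem?_getD] at hgap
      simp [pvChar, hgap]

-- ===== VERDICT (by name: the statement is the Claim_ definition above) =====
theorem merge_alignments_to_msa_spec : Claim_equal_merge_alignments_to_msa := by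
  intro aligned_seqs center_index _ _
  unfold Spec_merge_alignments_to_msa merge_alignments_to_msa merge_alignments_to_msa_alt
  rw [pvFoldA]
  apply List.map_congr_left
  intro s _
  rw [pvRowB_eq]
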